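-- pv_equiv track=rewrite | github.com/immalopez/graded_readers_stats | graded_readers_stats/utils.py | first_occurrence_of_term_in_sent
-- ===== SOURCE A (Python) =====
-- from typing import Optional, Tuple
--
-- def first_occurrence_of_term_in_sent(
--         term: [str],
--         sentence: [str]
-- ) -> Optional[Tuple[int, int]]:
--     """Returns a tuple(start, end) where start is the first index of
--     vocabulary in text and end is the end index of the vocabulary in text if
--     the lexical items contained in a vocabulary list are to be found in the
--     sentence lists of a given text, and None otherwise."""
--
--     term_num_words = len(term)  # is it a multi-word term?
--     if term_num_words == 1:
--         try:
--             index = sentence.index(term[0])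
--             return index, index + 1
--         except ValueError:
--             return None
--
--     term_index = 0
--     sent_index = 0
--     sent_len = len(sentence)
--     while sent_index < sent_len and term_index < term_num_words:
--         if sentence[sent_index] == term[term_index]:
--             sent_index += 1
--             term_index += 1
--             if term_index == term_num_words:
--                 # adjust start to include vocab item(s)
--                 return sent_index - term_num_words, sent_index  # a tuple
--         else:
--             sent_index = sent_index - term_index + 1
--             term_index = 0
--     return None
-- ===== SOURCE B (Python) =====
-- from typing import Optional, Tuple
--
-- def first_occurrence_of_term_in_sent(
--         term: [str],
--         sentence: [str]
-- ) -> Optional[Tuple[int, int]]: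
--     """Slide a window of len(term) over the sentence and compare slices;
--     returns (start, end) of the first window equal to term, else None."""
--     m = len(term)
--     for i in range(len(sentence) - m + 1):
--         if sentence[i:i + m] == term:
--             return i, i + m
--     return None
-- ===== Notes on version B (the rewrite author's own statement) =====
-- stated objective: simpler
-- what changed: A's two-index restart loop plus a separate list.index path for single-word terms is replaced by one uniform scan over start positions that compares the slice sentence[i:i+m] with term.
-- outside the precondition, e.g. on first_occurrence_of_term_in_sent([], ['a']): A returns None, B returns (0, 0)
import Mathlib
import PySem

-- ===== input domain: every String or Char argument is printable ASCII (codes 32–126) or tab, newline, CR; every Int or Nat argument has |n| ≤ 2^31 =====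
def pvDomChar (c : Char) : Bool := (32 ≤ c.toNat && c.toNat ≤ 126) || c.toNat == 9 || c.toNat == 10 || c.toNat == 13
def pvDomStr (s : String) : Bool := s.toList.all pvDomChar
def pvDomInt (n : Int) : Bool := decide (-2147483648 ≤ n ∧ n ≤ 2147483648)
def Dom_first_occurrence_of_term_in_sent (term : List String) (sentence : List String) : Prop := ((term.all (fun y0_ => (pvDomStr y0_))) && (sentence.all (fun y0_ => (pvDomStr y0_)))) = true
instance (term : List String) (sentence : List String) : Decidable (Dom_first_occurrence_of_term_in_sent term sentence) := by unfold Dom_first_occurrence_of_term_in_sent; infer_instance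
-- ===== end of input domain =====

-- B replaces A's two-index restart loop (and its separate single-word `.index` path) by one
-- uniform scan over start positions comparing the slice sentence[i:i+m] with term (objective: simpler).

-- ===== PORT A =====
-- the `while sent_index < sent_len and term_index < term_num_words` loop of A, step for step
def pvLoopA (term sentence : List String) (sentLen m tIdx sIdx : Nat) : Option (Int × Int) :=
  if h : sIdx < sentLen ∧ tIdx < m then
    if sentence[sIdx]? = term[tIdx]? then
      if tIdx + 1 = m then
        some (((sIdx : Int) + 1) - (m : Int), (sIdx : Int) + 1)
      else
        pvLoopA term sentence sentLen m (tIdx + 1) (sIdx + 1)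
    else
      pvLoopA term sentence sentLen m 0 (sIdx - tIdx + 1)
  else
    none
termination_by (sentLen - (sIdx - tIdx), m - tIdx)

def first_occurrence_of_term_in_sent (term : List String) (sentence : List String) : Option (Int × Int) :=
  let m := term.length
  if m = 1 then
    match PySem.List.index? sentence (term.headD "") with
    | some i => some ((i : Int), (i : Int) + 1)
    | none => none
  else
    pvLoopA term sentence sentence.length m 0 0

-- ===== PORT B =====
-- the `for i in range(len(sentence) - m + 1)` loop of B
def pvScanB (term sentence : List String) (m i stop : Nat) : Option (Int × Int) :=
  if i < stop then
    if PySem.List.slice sentence (some (i : Int)) (some ((i : Int) + (m : Int))) = term then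
      some ((i : Int), (i : Int) + (m : Int))
    else
      pvScanB term sentence m (i + 1) stop
  else
    none
termination_by stop - i

def first_occurrence_of_term_in_sent_alt (term : List String) (sentence : List String) : Option (Int × Int) :=
  pvScanB term sentence term.length 0 (sentence.length + 1 - term.length)

-- ===== PRECONDITION & SPEC =====
-- Pre_ excludes the empty term, on which A's None and B's (0, 0) are both defensible answers
-- for an unspecified degenerate corner (the empty term occurs vacuously everywhere).
def Pre_first_occurrence_of_term_in_sent (term : List String) (sentence : List String) : Prop :=
  term ≠ []
instance (term : List String) (sentence : List String) : Decidable (Pre_first_occurrence_of_term_in_sent term sentence) := by unfold Pre_first_occurrence_of_term_in_sent; infer_instance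

def pvWitness_first_occurrence_of_term_in_sent : List String × List String := (["b", "c"], ["a", "b", "c"])

def Spec_first_occurrence_of_term_in_sent (term : List String) (sentence : List String) (out : Option (Int × Int)) : Prop := out = first_occurrence_of_term_in_sent_alt term sentence
instance (term : List String) (sentence : List String) (out : Option (Int × Int)) : Decidable (Spec_first_occurrence_of_term_in_sent term sentence out) := by unfold Spec_first_occurrence_of_term_in_sent; infer_instance

-- ===== CLAIM (what is proved, stated in full; the proofs are below) =====
def Claim_equal_first_occurrence_of_term_in_sent : Prop := ∀ (term : List String) (sentence : List String), Dom_first_occurrence_of_term_in_sent term sentence → Pre_first_occurrence_of_term_in_sent term sentence → Spec_first_occurrence_of_term_in_sent term sentence (first_occurrence_of_term_in_sent term sentence)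

-- ===== LEMMAS AND PROOFS =====

theorem pvScanB_stop (term sentence : List String) (m i stop : Nat) (h : stop ≤ i) :
    pvScanB term sentence m i stop = none := by
  unfold pvScanB
  simp [Nat.not_lt.mpr h]

theorem pvScanB_skip (term sentence : List String) (m i stop : Nat)
    (h : (sentence.drop i).take m ≠ term) :
    pvScanB term sentence m i stop = pvScanB term sentence m (i + 1) stop := by
  rw [pvScanB]
  by_cases hi : i < stop
  · rw [if_pos hi, PySem.List.slice_natCast_add, if_neg h]
  · rw [if_neg hi, pvScanB_stop _ _ _ _ _ (by omega)]

theorem pvScanB_found (term sentence : List String) (m i stop : Nat) (hi : i < stop)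
    (h : (sentence.drop i).take m = term) :
    pvScanB term sentence m i stop = some ((i : Int), (i : Int) + (m : Int)) := by
  rw [pvScanB, if_pos hi, PySem.List.slice_natCast_add, if_pos h]

-- A's restart loop, from a state whose matched prefix is recorded in `hmatch`,
-- finds exactly what B's slice scan finds from start position sIdx - tIdx.
theorem pvLoopA_eq_scan (term sentence : List String) (sentLen m : Nat)
    (hlen : sentLen = sentence.length) (hm : m = term.length) :
    ∀ tIdx sIdx : Nat, tIdx ≤ sIdx → sIdx ≤ sentLen → tIdx < m →
    (sentence.drop (sIdx - tIdx)).take tIdx = term.take tIdx →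
    pvLoopA term sentence sentLen m tIdx sIdx
      = pvScanB term sentence m (sIdx - tIdx) (sentLen + 1 - m) := by
  intro tIdx sIdx
  induction tIdx, sIdx using pvLoopA.induct term sentence sentLen m with
  | case1 tIdx sIdx hcond heq hdone =>
    -- element match completing the term
    intro hts hsl htm hmatch
    obtain ⟨hs, ht⟩ := hcond
    rw [pvLoopA]
    rw [dif_pos ⟨hs, ht⟩, if_pos heq, if_pos hdone]
    have hfull : (sentence.drop (sIdx - tIdx)).take m = term := by
      rw [← hdone, List.take_add_one, hmatch, List.getElem?_drop]
      have : sIdx - tIdx + tIdx = sIdx := by omega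
      rw [this, heq, ← List.take_add_one, hdone, hm, List.take_length]
    rw [pvScanB_found term sentence m _ _ (by omega) hfull]
    congr 1
    simp only [Prod.mk.injEq]
    omega
  | case2 tIdx sIdx hcond heq hdone ih =>
    intro hts hsl htm hmatch
    obtain ⟨hs, ht⟩ := hcond
    rw [pvLoopA]
    rw [dif_pos ⟨hs, ht⟩, if_pos heq, if_neg hdone]
    have hstep : (sentence.drop (sIdx + 1 - (tIdx + 1))).take (tIdx + 1) = term.take (tIdx + 1) := by
      have h1 : sIdx + 1 - (tIdx + 1) = sIdx - tIdx := by omega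
      rw [h1, List.take_add_one, List.take_add_one, hmatch, List.getElem?_drop]
      have h2 : sIdx - tIdx + tIdx = sIdx := by omega
      rw [h2, heq]
    have := ih (by omega) (by omega) (by omega) hstep
    rw [this]
    congr 1
    omega
  | case3 tIdx sIdx hcond heq ih =>
    -- mismatch: restart at sIdx - tIdx + 1
    intro hts hsl htm hmatch
    obtain ⟨hs, ht⟩ := hcond
    rw [pvLoopA]
    rw [dif_pos ⟨hs, ht⟩, if_neg heq]
    have hne : (sentence.drop (sIdx - tIdx)).take m ≠ term := by
      intro hcontra
      apply heq
      have this : (List.take m (List.drop (sIdx - tIdx) sentence))[tIdx]? = term[tIdx]? := by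
        rw [hcontra]
      rw [List.getElem?_take_of_lt ht, List.getElem?_drop] at this
      have h2 : sIdx - tIdx + tIdx = sIdx := by omega
      rwa [h2] at this
    rw [pvScanB_skip term sentence m _ _ hne]
    have := ih (by omega) (by omega) (by omega) (by simp)
    simpa using this
  | case4 tIdx sIdx hcond =>
    intro hts hsl htm hmatch
    rw [pvLoopA, dif_neg hcond]
    have hs : sentLen ≤ sIdx := by
      rcases Nat.lt_or_ge sIdx sentLen with h | h
      · exact absurd ⟨h, htm⟩ hcond
      · exact h
    rw [pvScanB_stop _ _ _ _ _ (by omega)]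

-- B's scan with a single-word term is Python's list.index
theorem pvScanB_single (x : String) (sentence : List String) :
    ∀ (n i : Nat), sentence.length ≤ i + n →
      pvScanB [x] sentence 1 i sentence.length
        = (PySem.List.index? (sentence.drop i) x).map
            (fun j => (((i + j : Nat) : Int), ((i + j : Nat) : Int) + 1)) := by
  intro n
  induction n with
  | zero =>
    intro i h
    rw [pvScanB_stop _ _ _ _ _ (by omega), List.drop_eq_nil_of_le (by omega)]
    rfl
  | succ n ih =>
    intro i h
    by_cases hi : i < sentence.length
    · have hdrop : sentence.drop i = sentence[i] :: sentence.drop (i + 1) :=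
        List.drop_eq_getElem_cons hi
      by_cases hx : sentence[i] = x
      · have hsl : (sentence.drop i).take 1 = [x] := by rw [hdrop, hx]; rfl
        rw [pvScanB_found [x] sentence 1 i _ hi hsl, hdrop, hx,
          PySem.List.index?_cons_self]
        simp
      · have hsl : (sentence.drop i).take 1 ≠ [x] := by
          rw [hdrop]
          intro hc
          rw [List.take_succ_cons, List.take_zero] at hc
          injection hc with h1 _
          exact hx h1
        rw [pvScanB_skip [x] sentence 1 i _ hsl, ih (i + 1) (by omega), hdrop,
          PySem.List.index?_cons_of_ne _ hx, Option.map_map]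
        congr 1
        funext j
        simp only [Function.comp_apply, Prod.mk.injEq]
        omega
    · rw [pvScanB_stop _ _ _ _ _ (by omega), List.drop_eq_nil_of_le (by omega)]
      rfl

-- ===== VERDICT (by name: the statement is the Claim_ definition above) =====
theorem first_occurrence_of_term_in_sent_spec : Claim_equal_first_occurrence_of_term_in_sent := by
  intro term sentence _ hpre
  unfold Spec_first_occurrence_of_term_in_sent
  unfold first_occurrence_of_term_in_sent first_occurrence_of_term_in_sent_alt
  by_cases h1 : term.length = 1
  · obtain ⟨x, hx⟩ : ∃ x, term = [x] := by
      cases term with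
      | nil => simp at h1
      | cons a t => cases t with
        | nil => exact ⟨a, rfl⟩
        | cons b u => simp at h1
    subst hx
    have hone : ([x] : List String).length = 1 := rfl
    rw [hone, if_pos rfl, show sentence.length + 1 - 1 = sentence.length from rfl]
    have := pvScanB_single x sentence sentence.length 0 (by omega)
    simp only [Nat.zero_add, List.drop_zero] at this
    rw [this, show ([x] : List String).headD "" = x from rfl]
    cases PySem.List.index? sentence x <;> simp
  · simp only [if_neg h1]
    have hm : 1 ≤ term.length := by
      cases term with
      | nil => exact absurd rfl hpre
      | cons a t => simp
    have := pvLoopA_eq_scan term sentence sentence.length term.length rfl rfl 0 0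
      (le_refl 0) (by omega) (by omega) (by simp)
    simpa using this
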